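-- pv_equiv track=rewrite | github.com/Gautreaux/AOC-Python | Solutions2020/y2020d17.py | generateSurroundingStates
-- ===== SOURCE A (Python) =====
-- import itertools
-- from typing import Dict, Generator, Tuple
--
-- TYPE_POSITION = Tuple[int, ...]
--
-- def generateSurroundingStates(position : TYPE_POSITION) -> Generator[TYPE_POSITION, None, None]:
--     """Dimension unaware generate all neighbors of the position"""
--     transforms = (-1,0,1)
--     packed = [transforms]*len(position) # need to transform for each dimension
--     allZeros = tuple(([0]*len(position))) # number of zeros equal to dimension size
--     for permutation in itertools.product(*packed):
--         if permutation == allZeros: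
--             continue
--         else:
--             yield tuple(map(lambda x,y: x+y, position, permutation))
-- ===== SOURCE B (Python) =====
-- def generateSurroundingStates(position):
--     """Dimension unaware generate all neighbors of the position.
--
--     Recursive DFS over the dimensions: extend the partial neighbor with each
--     of head-1, head, head+1, carrying a flag telling whether the offset so
--     far is all zeros; the all-zero branch is skipped at the leaf, so no
--     offset tuples, product list or filtering pass are ever built.
--     """
--     def go(rest, acc, all_zero):
--         if not rest:
--             if not all_zero:
--                 yield acc
--             return
--         head = rest[0]
--         tail = rest[1:]
--         for d in (-1, 0, 1):
--             yield from go(tail, acc + (head + d,), all_zero and d == 0)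
--     yield from go(tuple(position), (), True)
-- ===== Notes on version B (the rewrite author's own statement) =====
-- stated objective: alternative
-- what changed: Replaced itertools.product over replicated offset tuples plus an equality filter and a zip-add by a direct recursion over the dimensions that builds each neighbor in place, fusing the all-zero skip into a boolean flag.
import Mathlib
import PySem

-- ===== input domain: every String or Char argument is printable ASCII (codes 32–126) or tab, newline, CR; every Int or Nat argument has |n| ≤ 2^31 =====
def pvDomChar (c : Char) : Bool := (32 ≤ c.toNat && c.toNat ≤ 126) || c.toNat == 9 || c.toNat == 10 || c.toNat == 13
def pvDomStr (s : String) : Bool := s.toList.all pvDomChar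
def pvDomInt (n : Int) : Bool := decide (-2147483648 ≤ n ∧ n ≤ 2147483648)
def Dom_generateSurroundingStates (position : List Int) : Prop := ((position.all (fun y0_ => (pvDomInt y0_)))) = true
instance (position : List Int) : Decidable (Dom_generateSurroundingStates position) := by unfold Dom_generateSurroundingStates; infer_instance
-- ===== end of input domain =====

-- B replaces itertools.product + all-zeros filter + zip-add by a direct recursion over
-- the dimensions with an all-zero flag (alternative decomposition, same cost).

-- ===== PORT A =====
-- itertools.product(*packed) in lexicographic order (first factor slowest), exact
def pyProduct : List (List Int) → List (List Int)
  | [] => [[]]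
  | l :: ls => l.flatMap (fun x => (pyProduct ls).map (fun p => x :: p))

def generateSurroundingStates (position : List Int) : List (List Int) :=
  let transforms : List Int := [-1, 0, 1]
  let packed := List.replicate position.length transforms
  let allZeros := List.replicate position.length (0 : Int)
  (pyProduct packed).foldl
    (fun acc permutation =>
      if permutation = allZeros then acc
      else acc ++ [List.zipWith (· + ·) position permutation]) []

-- ===== PORT B =====
def genGo : List Int → List Int → Bool → List (List Int)
  | [], acc, allZero => if allZero then [] else [acc]
  | head :: tail, acc, allZero =>
      ([-1, 0, 1] : List Int).flatMap
        (fun d => genGo tail (acc ++ [head + d]) (allZero && d == 0))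

def generateSurroundingStates_alt (position : List Int) : List (List Int) :=
  genGo position [] true

-- ===== PRECONDITION & SPEC =====
def Spec_generateSurroundingStates (position : List Int) (out : List (List Int)) : Prop := out = generateSurroundingStates_alt position
instance (position : List Int) (out : List (List Int)) : Decidable (Spec_generateSurroundingStates position out) := by unfold Spec_generateSurroundingStates; infer_instance

-- ===== CLAIM (what is proved, stated in full; the proofs are below) =====
def Claim_equal_generateSurroundingStates : Prop := ∀ (position : List Int), Dom_generateSurroundingStates position → Spec_generateSurroundingStates position (generateSurroundingStates position)

-- ===== LEMMAS AND PROOFS =====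

-- A's foldl with a skip branch is filterMap
theorem foldl_skip_append (l : List (List Int)) (z : List Int) (f : List Int → List Int)
    (init : List (List Int)) :
    l.foldl (fun acc p => if p = z then acc else acc ++ [f p]) init
      = init ++ l.filterMap (fun p => if p = z then none else some (f p)) := by
  induction l generalizing init with
  | nil => simp
  | cons h t ih =>
      by_cases hz : h = z <;> simp [List.foldl_cons, hz, ih]

-- characterisation of B's recursion in A's terms
theorem genGo_eq (rest acc : List Int) (allZero : Bool) :
    genGo rest acc allZero
      = (pyProduct (List.replicate rest.length [-1, 0, 1])).filterMap
          (fun p => if allZero = true ∧ p = List.replicate rest.length (0 : Int)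
                    then none else some (acc ++ List.zipWith (· + ·) rest p)) := by
  induction rest generalizing acc allZero with
  | nil =>
      cases allZero <;> simp [genGo, pyProduct]
  | cons h t ih =>
      simp only [genGo, List.length_cons, List.replicate_succ, pyProduct,
        List.filterMap_flatMap, List.filterMap_map]
      refine List.flatMap_congr ?_
      intro d _
      rw [ih]
      refine List.filterMap_congr ?_
      intro p _
      by_cases hd : d = (0 : Int)
      · by_cases hp : p = List.replicate t.length (0 : Int) <;>
          simp [hd, hp, List.zipWith, List.append_assoc]
      · simp [hd, List.zipWith, List.append_assoc, Function.comp]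

-- ===== VERDICT (by name: the statement is the Claim_ definition above) =====
theorem generateSurroundingStates_spec : Claim_equal_generateSurroundingStates := by
  intro position _
  show generateSurroundingStates position = generateSurroundingStates_alt position
  rw [generateSurroundingStates, generateSurroundingStates_alt, genGo_eq]
  simp only [foldl_skip_append, List.nil_append]
  refine List.filterMap_congr ?_
  intro p _
  simp
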